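-- pv_equiv track=rewrite | github.com/malegall/Cryptosyst-me_ElGamal | CryptageDecryptage.py | cryptage_message
-- ===== SOURCE A (Python) =====
-- def puiss_rec(a,n,p):
--     if n == 0:
--         return 1
--     else:
--         if n % 2 == 0:
--             b = a*a % p
--             return puiss_rec(b,n//2,p)
--         else:
--             b = a*a % p
--             return a*puiss_rec(b,(n-1)//2,p) % p
--
-- def cryptage_message(mess,xb,p,ya,g):
--
--     mess_code=[]
--
--     for i in range(0, len(mess)):
--         mess_code.append(mess[i])
--
--
--     for i in range(0, len(mess_code)):
--         mess_code[i] = puiss_rec(ya, xb, p)*ord(mess_code[i])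
--
--
--     info = puiss_rec(g, xb, p)
--
--     return(mess_code,info)
-- ===== SOURCE B (Python) =====
-- def cryptage_message(mess, xb, p, ya, g):
--     def powmod(a, e):
--         # iterative square-and-multiply: a**e % p for e >= 1, 1 for e <= 0
--         result = 1
--         base = a
--         while e > 0:
--             if e % 2 == 1:
--                 result = result * base % p
--             base = base * base % p
--             e //= 2
--         return result
--
--     factor = powmod(ya, xb)
--     mess_code = [factor * ord(c) for c in mess]
--     info = powmod(g, xb)
--     return (mess_code, info)
-- ===== Notes on version B (the rewrite author's own statement) =====
-- stated objective: faster
-- what changed: Replaces the recursive puiss_rec with an iterative square-and-multiply loop and computes the per-character factor puiss_rec(ya,xb,p) once instead of once per character, mapping over the string in a single comprehension.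
import Mathlib
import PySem

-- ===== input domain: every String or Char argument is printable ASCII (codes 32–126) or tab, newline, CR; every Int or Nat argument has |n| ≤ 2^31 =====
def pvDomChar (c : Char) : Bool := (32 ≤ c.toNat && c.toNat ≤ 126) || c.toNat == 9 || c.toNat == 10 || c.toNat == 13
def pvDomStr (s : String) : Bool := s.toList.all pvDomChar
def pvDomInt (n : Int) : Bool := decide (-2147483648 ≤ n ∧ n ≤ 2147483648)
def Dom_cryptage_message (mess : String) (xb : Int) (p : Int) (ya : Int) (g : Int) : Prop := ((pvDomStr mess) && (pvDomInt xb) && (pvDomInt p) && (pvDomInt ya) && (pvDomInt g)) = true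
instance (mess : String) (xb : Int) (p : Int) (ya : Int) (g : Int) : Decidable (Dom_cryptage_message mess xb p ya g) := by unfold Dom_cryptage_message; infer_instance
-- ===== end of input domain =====

-- B computes the per-character factor once with an iterative square-and-multiply loop
-- instead of A's per-character recursive exponentiation (objective: faster).


-- ===== PORT A =====
-- puiss_rec, recursing on the Nat image of the exponent (the Python recursion only
-- terminates for n ≥ 0, which Pre_ guarantees; on Nat m, 'n % 2' is m % 2, 'n // 2' is
-- m / 2 and '(n-1)//2' is (m-1)/2, exact by PySem.Int.mod_natCast/floordiv_natCast).
def puiss_rec_nat (a : Int) (m : Nat) (p : Int) : Int :=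
  if m = 0 then 1
  else if m % 2 = 0 then
    puiss_rec_nat (PySem.Int.mod (a * a) p) (m / 2) p
  else
    PySem.Int.mod (a * puiss_rec_nat (PySem.Int.mod (a * a) p) ((m - 1) / 2) p) p
decreasing_by all_goals omega

def puiss_rec (a : Int) (n : Int) (p : Int) : Int := puiss_rec_nat a n.toNat p

def cryptage_message (mess : String) (xb : Int) (p : Int) (ya : Int) (g : Int) : List Int × Int :=
  -- first loop: copy the characters of mess into mess_code one append at a time
  let mess_code : List Char := mess.toList.foldl (fun acc c => acc ++ [c]) []
  -- second loop: overwrite each cell with puiss_rec(ya,xb,p)*ord(c), recomputed per index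
  let mess_code2 : List Int := mess_code.map (fun c => puiss_rec ya xb p * (c.toNat : Int))
  let info := puiss_rec g xb p
  (mess_code2, info)

-- ===== PORT B =====
-- the while-loop of Source B's powmod, state (result, base, e); e < 0 never enters the loop,
-- exactly as int.toNat = 0 there.
def powmodLoop (res : Int) (base : Int) (e : Nat) (p : Int) : Int :=
  if e = 0 then res
  else powmodLoop (if e % 2 = 1 then PySem.Int.mod (res * base) p else res)
                  (PySem.Int.mod (base * base) p) (e / 2) p
decreasing_by omega

def powmod (a : Int) (e : Int) (p : Int) : Int := powmodLoop 1 a e.toNat p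

def cryptage_message_alt (mess : String) (xb : Int) (p : Int) (ya : Int) (g : Int) : List Int × Int :=
  let factor := powmod ya xb p
  let mess_code := mess.toList.map (fun c => factor * (c.toNat : Int))
  let info := powmod g xb p
  (mess_code, info)

-- ===== PRECONDITION & SPEC =====
-- Pre_ excludes exactly the crashes of A: xb < 0 (puiss_rec recurses forever,
-- RecursionError) and p = 0 with xb > 0 (ZeroDivisionError in 'a*a % p').
def Pre_cryptage_message (mess : String) (xb : Int) (p : Int) (ya : Int) (g : Int) : Prop :=
  0 ≤ xb ∧ (p ≠ 0 ∨ xb = 0)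
instance (mess : String) (xb : Int) (p : Int) (ya : Int) (g : Int) : Decidable (Pre_cryptage_message mess xb p ya g) := by unfold Pre_cryptage_message; infer_instance

def pvWitness_cryptage_message : String × Int × Int × Int × Int := ("Hi", 5, 23, 7, 3)

def Spec_cryptage_message (mess : String) (xb : Int) (p : Int) (ya : Int) (g : Int) (out : List Int × Int) : Prop := out = cryptage_message_alt mess xb p ya g
instance (mess : String) (xb : Int) (p : Int) (ya : Int) (g : Int) (out : List Int × Int) : Decidable (Spec_cryptage_message mess xb p ya g out) := by unfold Spec_cryptage_message; infer_instance

-- ===== CLAIM (what is proved, stated in full; the proofs are below) =====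
def Claim_equal_cryptage_message : Prop := ∀ (mess : String) (xb : Int) (p : Int) (ya : Int) (g : Int), Dom_cryptage_message mess xb p ya g → Pre_cryptage_message mess xb p ya g → Spec_cryptage_message mess xb p ya g (cryptage_message mess xb p ya g)

-- ===== LEMMAS AND PROOFS =====

-- two integers congruent mod p map to the same Python-% residue
lemma pymod_congr {p x y : Int} (hp : p ≠ 0) (h : p ∣ (x - y)) :
    PySem.Int.mod x p = PySem.Int.mod y p := by
  obtain ⟨k, hk⟩ := h
  have h1 := PySem.Int.floordiv_mul_add_mod x p
  have h2 := PySem.Int.floordiv_mul_add_mod y p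
  have hc : PySem.Int.mod x p - PySem.Int.mod y p
      = p * (k + PySem.Int.floordiv y p - PySem.Int.floordiv x p) := by
    linear_combination h1 - h2 + hk
  rcases lt_or_gt_of_ne hp with hneg | hpos
  · have b1 := (PySem.Int.mod_neg_bounds (a := x) hneg)
    have b2 := (PySem.Int.mod_neg_bounds (a := y) hneg)
    have hz := Int.eq_zero_of_abs_lt_dvd
      (m := -p) (x := PySem.Int.mod x p - PySem.Int.mod y p)
      ((neg_dvd).mpr ⟨_, hc⟩)
      (by rw [abs_lt]; constructor <;> linarith [b1.1, b1.2, b2.1, b2.2])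
    linarith
  · have b1n := PySem.Int.mod_nonneg (a := x) hpos
    have b1l := PySem.Int.mod_lt (a := x) hpos
    have b2n := PySem.Int.mod_nonneg (a := y) hpos
    have b2l := PySem.Int.mod_lt (a := y) hpos
    have hz := Int.eq_zero_of_abs_lt_dvd
      (m := p) (x := PySem.Int.mod x p - PySem.Int.mod y p)
      ⟨_, hc⟩ (by rw [abs_lt]; constructor <;> linarith)
    linarith

lemma pymod_mul_left {p : Int} (hp : p ≠ 0) (x y : Int) :
    PySem.Int.mod (PySem.Int.mod x p * y) p = PySem.Int.mod (x * y) p := by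
  apply pymod_congr hp
  have h := PySem.Int.floordiv_mul_add_mod x p
  exact ⟨-(PySem.Int.floordiv x p * y), by linear_combination (y : Int) * h⟩

lemma pymod_pow_mul {p : Int} (hp : p ≠ 0) (x : Int) (k : Nat) (y : Int) :
    PySem.Int.mod ((PySem.Int.mod x p) ^ k * y) p = PySem.Int.mod (x ^ k * y) p := by
  induction k generalizing y with
  | zero => simp
  | succ k ih =>
    have e1 : (PySem.Int.mod x p) ^ (k + 1) * y
        = (PySem.Int.mod x p) ^ k * (PySem.Int.mod x p * y) := by ring
    rw [e1, ih, mul_left_comm, pymod_mul_left hp]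
    congr 1; ring

lemma pymod_mul_right {p : Int} (hp : p ≠ 0) (x y : Int) :
    PySem.Int.mod (x * PySem.Int.mod y p) p = PySem.Int.mod (x * y) p := by
  rw [mul_comm, pymod_mul_left hp, mul_comm]

lemma pymod_pow {p : Int} (hp : p ≠ 0) (x : Int) (k : Nat) :
    PySem.Int.mod ((PySem.Int.mod x p) ^ k) p = PySem.Int.mod (x ^ k) p := by
  simpa using pymod_pow_mul hp x k 1

lemma puiss_rec_nat_eq {p : Int} (hp : p ≠ 0) :
    ∀ m : Nat, 1 ≤ m → ∀ a : Int, puiss_rec_nat a m p = PySem.Int.mod (a ^ m) p := by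
  intro m
  induction m using Nat.strong_induction_on with
  | _ m ih =>
    intro hm a
    rw [puiss_rec_nat, if_neg (by omega : ¬ m = 0)]
    by_cases he : m % 2 = 0
    · rw [if_pos he, ih (m / 2) (by omega) (by omega), pymod_pow hp]
      obtain ⟨k, hk⟩ : ∃ k, m = 2 * k := ⟨m / 2, by omega⟩
      have h4 : m / 2 = k := by omega
      rw [h4, hk]; congr 1; ring
    · rw [if_neg he]
      by_cases h1 : m = 1
      · subst h1
        rw [puiss_rec_nat]
        simp
      · rw [ih ((m - 1) / 2) (by omega) (by omega), pymod_mul_right hp]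
        rw [mul_comm a (PySem.Int.mod (a * a) p ^ ((m - 1) / 2)), pymod_pow_mul hp]
        obtain ⟨k, hk⟩ : ∃ k, m = 2 * k + 1 := ⟨(m - 1) / 2, by omega⟩
        have h4 : (m - 1) / 2 = k := by omega
        rw [h4, hk]; congr 1; ring

lemma powmodLoop_eq {p : Int} (hp : p ≠ 0) :
    ∀ e : Nat, 1 ≤ e → ∀ r b : Int, powmodLoop r b e p = PySem.Int.mod (r * b ^ e) p := by
  intro e
  induction e using Nat.strong_induction_on with
  | _ e ih =>
    intro he r b
    rw [powmodLoop, if_neg (by omega : ¬ e = 0)]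
    by_cases h2 : e / 2 = 0
    · have h1 : e = 1 := by omega
      subst h1
      rw [powmodLoop]
      simp
    · rw [ih (e / 2) (by omega) (by omega)]
      by_cases ho : e % 2 = 1
      · rw [if_pos ho, pymod_mul_left hp, mul_comm (r * b), pymod_pow_mul hp]
        obtain ⟨k, hk⟩ : ∃ k, e = 2 * k + 1 := ⟨e / 2, by omega⟩
        have h4 : e / 2 = k := by omega
        rw [h4, hk]; congr 1; ring
      · rw [if_neg ho, mul_comm r, pymod_pow_mul hp]
        obtain ⟨k, hk⟩ : ∃ k, e = 2 * k := ⟨e / 2, by omega⟩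
        have h4 : e / 2 = k := by omega
        rw [h4, hk]; congr 1; ring

lemma puiss_eq_powmod {xb p : Int} (hxb : 0 ≤ xb) (hp : p ≠ 0 ∨ xb = 0) (a : Int) :
    puiss_rec a xb p = powmod a xb p := by
  unfold puiss_rec powmod
  rcases Nat.eq_zero_or_pos xb.toNat with h0 | h1
  · rw [h0]; simp [puiss_rec_nat, powmodLoop]
  · have hp' : p ≠ 0 := by
      rcases hp with hp | hp
      · exact hp
      · omega
    rw [puiss_rec_nat_eq hp' _ h1, powmodLoop_eq hp' _ h1, one_mul]

-- ===== VERDICT (by name: the statement is the Claim_ definition above) =====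
theorem cryptage_message_spec : Claim_equal_cryptage_message := by
  intro mess xb p ya g _ hpre
  obtain ⟨hxb, hp⟩ := hpre
  show _ = _
  unfold cryptage_message cryptage_message_alt
  rw [PySem.List.foldl_append_singleton, puiss_eq_powmod hxb hp,
      puiss_eq_powmod hxb hp]
  simp
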